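-- pv_equiv track=rewrite | github.com/vitali87/code-graph-rag | benchmarks/bench_find_ending_with_fix.py | generate_realistic_registry
-- ===== SOURCE A (Python) =====
-- def generate_realistic_registry(count: int) -> tuple[list[str], list[str]]:
--     modules = ["codebase_rag", "utils", "parsers", "services", "tools", "models"]
--     submodules = ["core", "api", "handlers", "helpers", "base", "factory"]
--     classes = ["Handler", "Manager", "Factory", "Builder", "Processor", "Resolver",
--                "Analyzer", "Extractor", "Generator", "Validator"]
--     methods = ["process", "handle", "create", "build", "resolve", "validate",
--                "execute", "parse", "extract", "transform", "analyze", "generate",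
--                "find", "get", "set", "update", "delete", "check"]
--
--     qualified_names = []
--     for i in range(count):
--         mod = modules[i % len(modules)]
--         sub = submodules[(i // len(modules)) % len(submodules)]
--         cls = classes[(i // (len(modules) * len(submodules))) % len(classes)]
--         meth = methods[(i // (len(modules) * len(submodules) * len(classes))) % len(methods)]
--         qualified_names.append(f"{mod}.{sub}.{cls}.method_{i}.{meth}")
--
--     lookup_suffixes = methods + [f"method_{i}" for i in range(0, count, count // 20)]
--     return qualified_names, lookup_suffixes
-- ===== SOURCE B (Python) =====
-- def generate_realistic_registry(count: int) -> tuple[list[str], list[str]]: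
--     modules = ["codebase_rag", "utils", "parsers", "services", "tools", "models"]
--     submodules = ["core", "api", "handlers", "helpers", "base", "factory"]
--     classes = ["Handler", "Manager", "Factory", "Builder", "Processor", "Resolver",
--                "Analyzer", "Extractor", "Generator", "Validator"]
--     methods = ["process", "handle", "create", "build", "resolve", "validate",
--                "execute", "parse", "extract", "transform", "analyze", "generate",
--                "find", "get", "set", "update", "delete", "check"]
--
--     # One full period of the (mod, sub, cls, meth) cycle, modules varying fastest.
--     period = [(f"{mod}.{sub}.{cls}", meth)
--               for meth in methods
--               for cls in classes
--               for sub in submodules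
--               for mod in modules]
--
--     qualified_names = [f"{period[i % len(period)][0]}.method_{i}.{period[i % len(period)][1]}"
--                        for i in range(count)]
--
--     lookup_suffixes = methods + [f"method_{i}" for i in range(0, count, count // 20)]
--     return qualified_names, lookup_suffixes
-- ===== Notes on version B (the rewrite author's own statement) =====
-- stated objective: alternative
-- what changed: B precomputes the full 6480-entry cartesian period of (module, submodule, class, method) name combinations once and looks each item up with a single i % 6480 index, replacing A's four per-index div/mod computations; the suffix line is unchanged.
import Mathlib
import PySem

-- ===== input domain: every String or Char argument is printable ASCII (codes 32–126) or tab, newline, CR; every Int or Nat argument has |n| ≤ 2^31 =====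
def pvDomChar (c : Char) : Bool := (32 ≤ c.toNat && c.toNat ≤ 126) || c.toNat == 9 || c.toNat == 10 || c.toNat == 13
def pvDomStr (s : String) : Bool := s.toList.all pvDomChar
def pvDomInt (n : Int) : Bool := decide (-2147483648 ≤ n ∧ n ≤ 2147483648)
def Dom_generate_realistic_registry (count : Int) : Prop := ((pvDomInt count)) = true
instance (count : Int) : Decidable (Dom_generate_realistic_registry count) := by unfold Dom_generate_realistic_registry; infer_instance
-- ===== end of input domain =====

set_option maxRecDepth 10000


-- B replaces A's per-index div/mod arithmetic over four name lists by a precomputed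
-- cartesian period table indexed by a single modulo (objective: alternative decomposition).

-- ===== PORT A =====
-- shared name-list constants (defined inside the Python function; hoisted as constants)
def pvModules : List String := ["codebase_rag", "utils", "parsers", "services", "tools", "models"]
def pvSubmodules : List String := ["core", "api", "handlers", "helpers", "base", "factory"]
def pvClasses : List String := ["Handler", "Manager", "Factory", "Builder", "Processor", "Resolver",
  "Analyzer", "Extractor", "Generator", "Validator"]
def pvMethods : List String := ["process", "handle", "create", "build", "resolve", "validate",
  "execute", "parse", "extract", "transform", "analyze", "generate",
  "find", "get", "set", "update", "delete", "check"]

def generate_realistic_registry (count : Int) : List String × List String :=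
  let qualified_names := (PySem.List.pyRange 0 count 1).foldl (fun acc i =>
    let mod := PySem.List.pyGetD pvModules (PySem.Int.mod i (pvModules.length : Int)) ""
    let sub := PySem.List.pyGetD pvSubmodules
      (PySem.Int.mod (PySem.Int.floordiv i (pvModules.length : Int)) (pvSubmodules.length : Int)) ""
    let cls := PySem.List.pyGetD pvClasses
      (PySem.Int.mod (PySem.Int.floordiv i ((pvModules.length * pvSubmodules.length : Nat) : Int))
        (pvClasses.length : Int)) ""
    let meth := PySem.List.pyGetD pvMethods
      (PySem.Int.mod
        (PySem.Int.floordiv i ((pvModules.length * pvSubmodules.length * pvClasses.length : Nat) : Int))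
        (pvMethods.length : Int)) ""
    acc ++ [mod ++ "." ++ sub ++ "." ++ cls ++ ".method_" ++ PySem.Int.toStr i ++ "." ++ meth]) []
  let lookup_suffixes := pvMethods ++
    (PySem.List.pyRange 0 count (PySem.Int.floordiv count 20)).map
      (fun i => "method_" ++ PySem.Int.toStr i)
  (qualified_names, lookup_suffixes)

-- ===== PORT B =====
-- one full period of the (mod, sub, cls, meth) cycle, modules varying fastest
def pvPeriod : List (String × String) :=
  pvMethods.flatMap (fun meth =>
    pvClasses.flatMap (fun cls =>
      pvSubmodules.flatMap (fun sub =>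
        pvModules.map (fun mod => (mod ++ "." ++ sub ++ "." ++ cls, meth)))))

def generate_realistic_registry_alt (count : Int) : List String × List String :=
  let qualified_names := (PySem.List.pyRange 0 count 1).map (fun i =>
    let pm := PySem.List.pyGetD pvPeriod (PySem.Int.mod i (pvPeriod.length : Int)) ("", "")
    pm.1 ++ ".method_" ++ PySem.Int.toStr i ++ "." ++ pm.2)
  let lookup_suffixes := pvMethods ++
    (PySem.List.pyRange 0 count (PySem.Int.floordiv count 20)).map
      (fun i => "method_" ++ PySem.Int.toStr i)
  (qualified_names, lookup_suffixes)

-- ===== PRECONDITION & SPEC =====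
-- Pre_ excludes 0 ≤ count ≤ 19, on which A (and B) raise ValueError: range(0, count, count//20) has step 0.
def Pre_generate_realistic_registry (count : Int) : Prop := count < 0 ∨ 20 ≤ count
instance (count : Int) : Decidable (Pre_generate_realistic_registry count) := by
  unfold Pre_generate_realistic_registry; infer_instance

def pvWitness_generate_realistic_registry : Int := 20

def Spec_generate_realistic_registry (count : Int) (out : List String × List String) : Prop :=
  out = generate_realistic_registry_alt count
instance (count : Int) (out : List String × List String) :
    Decidable (Spec_generate_realistic_registry count out) := by
  unfold Spec_generate_realistic_registry; infer_instance

-- ===== CLAIM (what is proved, stated in full; the proofs are below) =====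
def Claim_equal_generate_realistic_registry : Prop :=
  ∀ (count : Int), Dom_generate_realistic_registry count →
    Pre_generate_realistic_registry count →
    Spec_generate_realistic_registry count (generate_realistic_registry count)

-- ===== LEMMAS AND PROOFS =====

theorem pv_flatMap_get? {α β : Type} (d : α) (f : α → List β) (k : Nat)
    (hk : ∀ a, (f a).length = k) :
    ∀ (xs : List α) (q r : Nat), r < k → q < xs.length →
      (xs.flatMap f)[q * k + r]? = (f (xs.getD q d))[r]? := by
  intro xs
  induction xs with
  | nil => intro q r _ hq; simp at hq
  | cons a xs ih =>
    intro q r hr hq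
    cases q with
    | zero =>
      rw [List.flatMap_cons, List.getElem?_append_left (by rw [hk]; simpa using hr)]
      simp
    | succ q =>
      have harith : (q + 1) * k + r = k + (q * k + r) := by ring
      rw [List.flatMap_cons, harith,
        List.getElem?_append_right (by rw [hk]; omega)]
      rw [hk]
      have : k + (q * k + r) - k = q * k + r := by omega
      rw [this]
      have := ih q r hr (by simpa using hq)
      simpa using this

theorem pv_len_inner1 : ∀ meth : String,
    (pvClasses.flatMap (fun cls =>
      pvSubmodules.flatMap (fun sub =>
        pvModules.map (fun mod => (mod ++ "." ++ sub ++ "." ++ cls, meth))))).length = 360 := by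
  intro meth
  simp [pvClasses, pvSubmodules, pvModules]

theorem pv_len_inner2 : ∀ (meth cls : String),
    (pvSubmodules.flatMap (fun sub =>
      pvModules.map (fun mod => (mod ++ "." ++ sub ++ "." ++ cls, meth)))).length = 36 := by
  intro meth cls
  simp [pvSubmodules, pvModules]

theorem pv_len_inner3 : ∀ (meth cls sub : String),
    (pvModules.map (fun mod => (mod ++ "." ++ sub ++ "." ++ cls, meth))).length = 6 := by
  intro meth cls sub
  simp [pvModules]

theorem pv_len_modules : pvModules.length = 6 := rfl
theorem pv_len_submodules : pvSubmodules.length = 6 := rfl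
theorem pv_len_classes : pvClasses.length = 10 := rfl
theorem pv_len_methods : pvMethods.length = 18 := rfl

theorem pvPeriod_get' (m c s mo : Nat) (hm : m < 18) (hc : c < 10) (hs : s < 6) (hmo : mo < 6) :
    pvPeriod[m * 360 + (c * 36 + (s * 6 + mo))]? = some
      (pvModules.getD mo "" ++ "." ++ pvSubmodules.getD s "" ++ "." ++
        pvClasses.getD c "", pvMethods.getD m "") := by
  rw [pvPeriod]
  rw [pv_flatMap_get? "" _ 360 pv_len_inner1 pvMethods m (c * 36 + (s * 6 + mo))
    (by omega) (by rw [pv_len_methods]; omega)]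
  rw [pv_flatMap_get? "" _ 36 (pv_len_inner2 _) pvClasses c (s * 6 + mo)
    (by omega) (by rw [pv_len_classes]; omega)]
  rw [pv_flatMap_get? "" _ 6 (pv_len_inner3 _ _) pvSubmodules s mo
    (by omega) (by rw [pv_len_submodules]; omega)]
  rw [List.getElem?_map]
  have hmo' : mo < pvModules.length := by rw [pv_len_modules]; omega
  rw [List.getElem?_eq_getElem hmo']
  rw [show pvModules.getD mo "" = pvModules[mo] from List.getD_eq_getElem _ _ hmo']
  rfl

theorem pvPeriod_get (j : Nat) (hj : j < 6480) :
    pvPeriod[j]? = some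
      (pvModules.getD (j % 6) "" ++ "." ++ pvSubmodules.getD (j / 6 % 6) "" ++ "." ++
        pvClasses.getD (j / 36 % 10) "", pvMethods.getD (j / 360) "") := by
  have h := pvPeriod_get' (j / 360) (j / 36 % 10) (j / 6 % 6) (j % 6)
    (by omega) (by omega) (by omega) (by omega)
  rw [show j / 360 * 360 + (j / 36 % 10 * 36 + (j / 6 % 6 * 6 + j % 6)) = j from by omega] at h
  rw [h]

set_option maxRecDepth 100000 in
theorem pvPeriod_length : pvPeriod.length = 6480 := by decide

-- ===== VERDICT (by name: the statement is the Claim_ definition above) =====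
theorem generate_realistic_registry_spec : Claim_equal_generate_realistic_registry := by
  intro count _ _
  unfold Spec_generate_realistic_registry
  unfold generate_realistic_registry generate_realistic_registry_alt
  simp only []
  refine Prod.ext ?_ rfl
  rw [PySem.List.foldl_append_singleton_eq_map, List.nil_append]
  apply List.map_congr_left
  intro i hi
  have hmem := (PySem.List.mem_pyRange_one).mp hi
  obtain ⟨h0, _⟩ := hmem
  lift i to Nat using h0 with n
  simp only [PySem.Int.mod_natCast, PySem.Int.floordiv_natCast, PySem.List.pyGetD_natCast,
    pvPeriod_length, pv_len_modules, pv_len_submodules, pv_len_classes, pv_len_methods]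
  norm_num
  have hj : n % 6480 < 6480 := Nat.mod_lt _ (by norm_num)
  rw [pvPeriod_get _ hj]
  rw [show n % 6480 % 6 = n % 6 by omega,
      show n % 6480 / 6 % 6 = n / 6 % 6 by omega,
      show n % 6480 / 36 % 10 = n / 36 % 10 by omega,
      show n % 6480 / 360 = n / 360 % 18 by omega]
  simp only [Option.getD_some, List.getD_eq_getElem?_getD]
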